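-- pv_equiv track=rewrite | github.com/enirin/Game-Server-Management-API | config_loader.py | normalize_server_aliases
-- ===== SOURCE A (Python) =====
-- def normalize_server_aliases(raw_aliases, index):
--     if raw_aliases is None:
--         return []
--
--     if not isinstance(raw_aliases, list):
--         raise ValueError(f"servers[{index}].server_aliases must be a list")
--
--     normalized_aliases = []
--     seen_aliases = set()
--     for alias_index, alias in enumerate(raw_aliases):
--         alias_text = str(alias).strip()
--         if not alias_text:
--             raise ValueError(f"servers[{index}].server_aliases[{alias_index}] must not be empty")
--         if alias_text in seen_aliases:
--             continue
--         seen_aliases.add(alias_text)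
--         normalized_aliases.append(alias_text)
--
--     return normalized_aliases
-- ===== SOURCE B (Python) =====
-- def normalize_server_aliases(raw_aliases, index):
--     if raw_aliases is None:
--         return []
--     if not isinstance(raw_aliases, list):
--         raise ValueError(f"servers[{index}].server_aliases must be a list")
--     texts = []
--     for alias_index, alias in enumerate(raw_aliases):
--         text = str(alias).strip()
--         if not text:
--             raise ValueError(f"servers[{index}].server_aliases[{alias_index}] must not be empty")
--         texts.append(text)
--     # dedup by head-and-filter: take the first text, drop all its later
--     # occurrences, repeat on what is left (keeps first occurrences in order)
--     result = []
--     while texts: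
--         head = texts[0]
--         result.append(head)
--         texts = [t for t in texts[1:] if t != head]
--     return result
-- ===== Notes on version B (the rewrite author's own statement) =====
-- stated objective: alternative
-- what changed: Replaces A's single loop with an in-loop seen-set by two stages: a validation/strip pass, then a head-and-filter dedup that repeatedly takes the first text and deletes its later occurrences from the remainder (no seen-set at all); trades O(n) for O(n^2) dedup in exchange for dropping the auxiliary set.
import Mathlib
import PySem

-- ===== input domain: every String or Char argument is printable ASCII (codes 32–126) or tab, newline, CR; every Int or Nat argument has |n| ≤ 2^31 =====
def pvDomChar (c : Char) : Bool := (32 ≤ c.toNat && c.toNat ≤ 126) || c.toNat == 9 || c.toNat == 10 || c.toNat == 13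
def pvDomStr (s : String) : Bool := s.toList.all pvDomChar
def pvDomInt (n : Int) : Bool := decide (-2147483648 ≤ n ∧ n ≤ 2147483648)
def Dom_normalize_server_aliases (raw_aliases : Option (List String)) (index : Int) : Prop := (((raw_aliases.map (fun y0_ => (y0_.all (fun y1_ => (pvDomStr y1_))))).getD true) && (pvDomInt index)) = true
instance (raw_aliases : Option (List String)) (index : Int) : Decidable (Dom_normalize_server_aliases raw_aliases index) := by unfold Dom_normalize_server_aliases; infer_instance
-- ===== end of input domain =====

-- ===== PORT A =====
-- B splits validation from dedup and deduplicates by head-and-filter recursion instead of A's in-loop seen-set (objective: alternative).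
-- A's loop over raw aliases keeping (seen set, normalized list); empty stripped alias = ValueError (excluded by Pre_, returns acc here)
def pvLoopA : List String → PySem.Set String → List String → List String
  | [], _, acc => acc
  | x :: rest, seen, acc =>
    let t := PySem.Str.strip x
    if t = "" then acc
    else if PySem.Set.contains seen t then pvLoopA rest seen acc
    else pvLoopA rest (PySem.Set.add seen t) (acc ++ [t])

def normalize_server_aliases (raw_aliases : Option (List String)) (index : Int) : List String :=
  match raw_aliases with
  | none => []
  | some l => pvLoopA l PySem.Set.empty []

-- ===== PORT B =====
-- B's first pass: strip every alias; none = ValueError on an empty stripped alias (excluded by Pre_)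
def pvTexts : List String → Option (List String)
  | [] => some []
  | x :: rest =>
    let t := PySem.Str.strip x
    if t = "" then none
    else (pvTexts rest).map (fun ts => t :: ts)

-- B's while loop: take the first text, filter its occurrences out of the rest, recurse
def pvDedupFilter : List String → List String
  | [] => []
  | t :: rest => t :: pvDedupFilter (rest.filter (fun x => x ≠ t))
termination_by l => l.length
decreasing_by
  simp only [List.length_unattach, List.length_cons]
  exact Nat.lt_succ_of_le (le_trans (List.length_filter_le _ _) (by simp))

def normalize_server_aliases_alt (raw_aliases : Option (List String)) (index : Int) : List String :=
  match raw_aliases with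
  | none => []
  | some l =>
    match pvTexts l with
    | none => []
    | some texts => pvDedupFilter texts

-- ===== PRECONDITION & SPEC =====
-- Pre_ excludes exactly the inputs on which A raises ValueError: a list containing an alias that strips to empty.
def Pre_normalize_server_aliases (raw_aliases : Option (List String)) (index : Int) : Prop :=
  ∀ x ∈ raw_aliases.getD [], PySem.Str.strip x ≠ ""
instance (raw_aliases : Option (List String)) (index : Int) : Decidable (Pre_normalize_server_aliases raw_aliases index) := by unfold Pre_normalize_server_aliases; infer_instance

def pvWitness_normalize_server_aliases : Option (List String) × Int := (some [" web ", "Web", "web"], 0)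

def Spec_normalize_server_aliases (raw_aliases : Option (List String)) (index : Int) (out : List String) : Prop := out = normalize_server_aliases_alt raw_aliases index
instance (raw_aliases : Option (List String)) (index : Int) (out : List String) : Decidable (Spec_normalize_server_aliases raw_aliases index out) := by unfold Spec_normalize_server_aliases; infer_instance

-- ===== CLAIM (what is proved, stated in full; the proofs are below) =====
def Claim_equal_normalize_server_aliases : Prop := ∀ (raw_aliases : Option (List String)) (index : Int), Dom_normalize_server_aliases raw_aliases index → Pre_normalize_server_aliases raw_aliases index → Spec_normalize_server_aliases raw_aliases index (normalize_server_aliases raw_aliases index)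

-- ===== LEMMAS AND PROOFS =====
-- A's loop with seen = acc is a fold of Set.add over the stripped aliases
theorem pvLoopA_eq_foldl (l : List String) (s : PySem.Set String)
    (h : ∀ x ∈ l, PySem.Str.strip x ≠ "") :
    pvLoopA l s s = (l.map PySem.Str.strip).foldl PySem.Set.add s := by
  induction l generalizing s with
  | nil => simp [pvLoopA]
  | cons x rest ih =>
    have hx : PySem.Str.strip x ≠ "" := h x (List.mem_cons_self)
    have hrest : ∀ y ∈ rest, PySem.Str.strip y ≠ "" := fun y hy => h y (List.mem_cons_of_mem _ hy)
    simp only [pvLoopA, List.map_cons, List.foldl_cons, if_neg hx]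
    by_cases hm : PySem.Str.strip x ∈ s
    · have hc : PySem.Set.contains s (PySem.Str.strip x) = true := by
        simp [PySem.Set.contains, hm]
      rw [if_pos hc]
      have hadd : PySem.Set.add s (PySem.Str.strip x) = s := by
        simp [PySem.Set.add, PySem.Set.contains, hm]
      rw [hadd]; exact ih s hrest
    · have hc : ¬ PySem.Set.contains s (PySem.Str.strip x) = true := by
        simp [PySem.Set.contains, hm]
      rw [if_neg hc]
      have hadd : PySem.Set.add s (PySem.Str.strip x) = s ++ [PySem.Str.strip x] := by
        simp [PySem.Set.add, PySem.Set.contains, hm]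
      rw [← hadd]; exact ih _ hrest

-- B's first pass succeeds with exactly the stripped aliases when none strips to empty
theorem pvTexts_eq_map (l : List String) (h : ∀ x ∈ l, PySem.Str.strip x ≠ "") :
    pvTexts l = some (l.map PySem.Str.strip) := by
  induction l with
  | nil => simp [pvTexts]
  | cons x rest ih =>
    have hx : PySem.Str.strip x ≠ "" := h x (List.mem_cons_self)
    have hrest : ∀ y ∈ rest, PySem.Str.strip y ≠ "" := fun y hy => h y (List.mem_cons_of_mem _ hy)
    simp [pvTexts, hx, ih hrest]

-- folding Set.add ignores elements already present in the accumulator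
theorem foldl_add_filter (t : String) (ts : List String) :
    ∀ acc : PySem.Set String, t ∈ acc →
      ts.foldl PySem.Set.add acc = (ts.filter (fun x => x ≠ t)).foldl PySem.Set.add acc := by
  induction ts with
  | nil => intro acc _; rfl
  | cons x rest ih =>
    intro acc hmem
    by_cases hxt : x = t
    · subst hxt
      have hadd : PySem.Set.add acc x = acc := by
        simp [PySem.Set.add, PySem.Set.contains, hmem]
      simp [hadd, ih acc hmem]
    · have hmem' : t ∈ PySem.Set.add acc x := by
        simp [PySem.Set.add, PySem.Set.contains]
        split <;> simp [hmem]
      simp [hxt, ih _ hmem']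

-- a head not occurring later can be peeled off the accumulator
theorem foldl_add_cons (t : String) (ts : List String) (hnot : t ∉ ts) :
    ∀ s : PySem.Set String, t ∉ s →
      ts.foldl PySem.Set.add (t :: s) = t :: ts.foldl PySem.Set.add s := by
  induction ts with
  | nil => intro s _; rfl
  | cons x rest ih =>
    intro s hts
    have hxt : x ≠ t := fun h => hnot (h ▸ List.mem_cons_self)
    have hrest : t ∉ rest := fun h => hnot (List.mem_cons_of_mem _ h)
    by_cases hxs : x ∈ s
    · have h1 : PySem.Set.add (t :: s) x = t :: s := by
        simp [PySem.Set.add, PySem.Set.contains, hxs]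
      have h2 : PySem.Set.add s x = s := by
        simp [PySem.Set.add, PySem.Set.contains, hxs]
      simp only [List.foldl_cons, h1, h2]; exact ih hrest s hts
    · have h1 : PySem.Set.add (t :: s) x = t :: (s ++ [x]) := by
        have : x ∉ (t :: s) := by simp [hxt, hxs]
        simp [PySem.Set.add, PySem.Set.contains, this]
      have h2 : PySem.Set.add s x = s ++ [x] := by
        simp [PySem.Set.add, PySem.Set.contains, hxs]
      simp only [List.foldl_cons, h1, h2]
      exact ih hrest (s ++ [x]) (by simp [hts, Ne.symm hxt])

-- the seen-set fold computes exactly the head-and-filter dedup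
theorem ofList_eq_dedupFilter (ts : List String) :
    ts.foldl PySem.Set.add PySem.Set.empty = pvDedupFilter ts := by
  induction hn : ts.length using Nat.strong_induction_on generalizing ts with
  | _ n ih =>
    match ts with
    | [] => exact pvDedupFilter.eq_1.symm
    | t :: rest =>
      have hadd : PySem.Set.add PySem.Set.empty t = [t] := rfl
      have hlt : (rest.filter (fun x => x ≠ t)).length < n := by
        subst hn
        simp only [List.length_cons]
        exact Nat.lt_succ_of_le (List.length_filter_le _ _)
      have hnot : t ∉ rest.filter (fun x => x ≠ t) := by
        simp [List.mem_filter]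
      calc (t :: rest).foldl PySem.Set.add PySem.Set.empty
          = rest.foldl PySem.Set.add [t] := by simp [List.foldl_cons]
        _ = (rest.filter (fun x => x ≠ t)).foldl PySem.Set.add [t] :=
            foldl_add_filter t rest [t] (List.mem_cons_self)
        _ = t :: (rest.filter (fun x => x ≠ t)).foldl PySem.Set.add PySem.Set.empty :=
            foldl_add_cons t _ hnot PySem.Set.empty (by simp [PySem.Set.empty])
        _ = t :: pvDedupFilter (rest.filter (fun x => x ≠ t)) := by
            rw [ih _ hlt _ rfl]
        _ = pvDedupFilter (t :: rest) := (pvDedupFilter.eq_2 t rest).symm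

-- ===== VERDICT (by name: the statement is the Claim_ definition above) =====
theorem normalize_server_aliases_spec : Claim_equal_normalize_server_aliases := by
  intro raw_aliases index _ hpre
  unfold Spec_normalize_server_aliases
  match raw_aliases with
  | none => rfl
  | some l =>
    simp only [normalize_server_aliases, normalize_server_aliases_alt,
      pvTexts_eq_map l hpre]
    rw [show ([] : List String) = PySem.Set.empty from rfl,
      pvLoopA_eq_foldl l PySem.Set.empty hpre,
      ofList_eq_dedupFilter]
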